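-- pv_equiv track=rewrite | github.com/cilaaaa/Kline | uiKLine.py | getdp_add
-- ===== SOURCE A (Python) =====
-- def getdp_add(data):
--     # n = len(data)
--     # result = []
--     # seq = []
--     # if n > 0:
--     #     m = [0] * n
--     #     for x in range(n - 2, -1, -1):
--     #         for y in range(n - 1, x, -1):
--     #             if data[x] < data[y] and m[x] <= m[y]:
--     #                 m[x] += 1
--     #         max_value = max(m)
--     #         result = []
--     #         seq = []
--     #         for i in range(n):
--     #             if m[i] == max_value:
--     #                 result.append(data[i])
--     #                 seq.append(i)
--     #                 # 获取Seq返回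
--     #                 max_value -= 1
--     #     if len(result) == 0:
--     #         return None,None
--     # return result[-1],seq[-1]
--     result = []
--     seq = []
--     n = len(data)
--     longest = 0
--     biggest = 0
--     for x in range(0,n-1):
--         Max = data[x]
--         temp = [Max]
--         tempseq = [x]
--         for y in range(x + 1,n):
--             if Max < data[y]:
--                 Max = data[y]
--                 temp.append(Max)
--                 tempseq.append(y)
--         if len(temp) > longest:
--             result = temp
--             seq = tempseq
--             longest = len(temp)
--             biggest = Max
--         elif len(temp) == longest:
--             if Max >= biggest:
--                 result = temp
--                 seq = tempseq
--                 longest = len(temp)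
--                 biggest = Max
--     if len(result) == 0:
--         return None,None
--     return result[-1],seq[-1]
-- ===== SOURCE B (Python) =====
-- def getdp_add(data):
--     # One backward pass: a monotonic stack memoizes, for each position, the
--     # greedy increasing-record chain's (length, terminal value, terminal index);
--     # the best start (longest chain, ties by larger terminal value, then smaller
--     # start index never matters since we scan right-to-left with strict wins)
--     # is selected in the same pass.
--     n = len(data)
--     if n <= 1:
--         return None, None
--     stack = []  # entries (value, chain_len, term_val, term_idx); values strictly decrease toward the top (end)
--     best = None  # (chain_len, term_val, term_idx) of the best start seen so far
--     i = n
--     for v in reversed(data):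
--         i -= 1
--         while stack and stack[-1][0] <= v:
--             stack.pop()
--         if stack:
--             top = stack[-1]
--             info = (top[1] + 1, top[2], top[3])
--         else:
--             info = (1, v, i)
--         stack.append((v, info[0], info[1], info[2]))
--         if i < n - 1:
--             if best is None or info[0] > best[0] or (info[0] == best[0] and info[1] > best[1]):
--                 best = info
--     return best[1], best[2]
-- ===== Notes on version B (the rewrite author's own statement) =====
-- stated objective: faster
-- what changed: A rebuilds the greedy increasing-record chain from scratch for every start index (nested scans); B makes one backward pass with a monotonic stack that memoizes each start's chain (length, terminal value, terminal index) and selects the best start in the same pass.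
import Mathlib
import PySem

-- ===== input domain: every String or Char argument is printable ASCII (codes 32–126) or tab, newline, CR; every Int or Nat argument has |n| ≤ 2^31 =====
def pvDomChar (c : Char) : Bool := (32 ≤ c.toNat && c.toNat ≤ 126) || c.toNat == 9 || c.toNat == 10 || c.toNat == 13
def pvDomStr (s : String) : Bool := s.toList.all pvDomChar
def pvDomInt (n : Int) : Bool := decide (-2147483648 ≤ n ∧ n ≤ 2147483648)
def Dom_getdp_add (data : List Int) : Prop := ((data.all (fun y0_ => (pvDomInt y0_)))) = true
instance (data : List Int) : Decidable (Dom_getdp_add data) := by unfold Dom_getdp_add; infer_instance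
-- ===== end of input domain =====

-- B replaces A's quadratic start-by-start rescans with one backward monotonic-stack pass
-- that memoizes each start's record-chain (length, terminal value, terminal index); objective: faster.

-- ===== PORT A =====
-- A: for every start x, scan the suffix collecting running-maximum records, then keep the
-- longest chain (ties: terminal value >= current best, so later starts win ties).
-- data[x]/data[y] are always in range (x, y come from ranges bounded by len(data)), ported with pyGetD.
def getdp_add (data : List Int) : Option Int × Option Int :=
  let n : Int := data.length
  let st := (PySem.List.pyRange 0 (n - 1) 1).foldl (fun (st : List Int × List Int × Int × Int) x =>
    let inner := (PySem.List.pyRange (x + 1) n 1).foldl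
      (fun (s : Int × List Int × List Int) y =>
        if s.1 < PySem.List.pyGetD data y 0 then
          (PySem.List.pyGetD data y 0, s.2.1 ++ [PySem.List.pyGetD data y 0], s.2.2 ++ [y])
        else s)
      (PySem.List.pyGetD data x 0, [PySem.List.pyGetD data x 0], [x])
    if (inner.2.1.length : Int) > st.2.2.1 then (inner.2.1, inner.2.2, (inner.2.1.length : Int), inner.1)
    else if (inner.2.1.length : Int) = st.2.2.1 then
      if inner.1 ≥ st.2.2.2 then (inner.2.1, inner.2.2, (inner.2.1.length : Int), inner.1) else st
    else st)
    ([], [], 0, 0)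
  if st.1.length = 0 then (none, none)
  else (PySem.List.pyGet? st.1 (-1), PySem.List.pyGet? st.2.1 (-1))

-- ===== PORT B =====
-- B: one pass over reversed(data); Python uses the list end as stack top, ported as a cons-top list
-- (append = cons, the pop-while loop = dropWhile).  State (i, stack, best) as in Source B.
def altStep (n : Int) (st : Int × List (Int × Int × Int × Int) × Option (Int × Int × Int)) (v : Int) :
    Int × List (Int × Int × Int × Int) × Option (Int × Int × Int) :=
  let i := st.1 - 1
  let stack1 := st.2.1.dropWhile (fun t => t.1 ≤ v)
  let info : Int × Int × Int :=
    match stack1 with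
    | [] => (1, v, i)
    | t :: _ => (t.2.1 + 1, t.2.2.1, t.2.2.2)
  let best :=
    if i < n - 1 then
      match st.2.2 with
      | none => some info
      | some b => if info.1 > b.1 ∨ (info.1 = b.1 ∧ info.2.1 > b.2.1) then some info else some b
    else st.2.2
  (i, (v, info) :: stack1, best)

def getdp_add_alt (data : List Int) : Option Int × Option Int :=
  let n : Int := data.length
  if n ≤ 1 then (none, none)
  else
    let st := data.reverse.foldl (altStep n) (n, [], none)
    match st.2.2 with
    | none => (none, none)
    | some b => (some b.2.1, some b.2.2)

-- ===== PRECONDITION & SPEC =====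
def Spec_getdp_add (data : List Int) (out : Option Int × Option Int) : Prop := out = getdp_add_alt data
instance (data : List Int) (out : Option Int × Option Int) : Decidable (Spec_getdp_add data out) := by unfold Spec_getdp_add; infer_instance

-- ===== CLAIM (what is proved, stated in full; the proofs are below) =====
def Claim_equal_getdp_add : Prop := ∀ (data : List Int), Dom_getdp_add data → Spec_getdp_add data (getdp_add data)

-- ===== LEMMAS AND PROOFS =====

-- (idx, value) pairs of a suffix starting at position s
def idxs : Nat → List Int → List (Int × Int)
| _, [] => []
| s, v :: r => ((s : Int), v) :: idxs (s + 1) r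

-- the greedy increasing-record chain of a list of (idx, value) pairs
def chain : List (Int × Int) → List (Int × Int)
| [] => []
| p :: r => p :: (chain r).dropWhile (fun q => q.2 ≤ p.2)

-- (length, terminal value, terminal index) of a chain
def cInfo : List (Int × Int) → Option (Int × Int × Int)
| [] => none
| p :: c => some (match cInfo c with
    | none => (1, p.2, p.1)
    | some t => (t.1 + 1, t.2.1, t.2.2))

def cD (z : List (Int × Int)) : Int × Int × Int := (cInfo z).getD (0, 0, 0)

-- per-start triples for all starts except the last position
def trips : List (Int × Int) → List (Int × Int × Int)
| [] => []
| [_] => []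
| p :: q :: r => cD (chain (p :: q :: r)) :: trips (q :: r)

-- A's selection step / B's selection step on triples
def selA (acc : Option (Int × Int × Int)) (t : Int × Int × Int) : Option (Int × Int × Int) :=
  match acc with
  | none => some t
  | some b => if t.1 > b.1 then some t
      else if t.1 = b.1 ∧ t.2.1 ≥ b.2.1 then some t else some b

def selB (acc : Option (Int × Int × Int)) (t : Int × Int × Int) : Option (Int × Int × Int) :=
  match acc with
  | none => some t
  | some b => if t.1 > b.1 ∨ (t.1 = b.1 ∧ t.2.1 > b.2.1) then some t else some b

-- abstract form of A's outer loop
def aupd (st : List Int × List Int × Int × Int) (c : List (Int × Int)) :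
    List Int × List Int × Int × Int :=
  let temp := c.map (·.2)
  let tempseq := c.map (·.1)
  let M := (c.getLastD (0, 0)).2
  if (temp.length : Int) > st.2.2.1 then (temp, tempseq, (temp.length : Int), M)
  else if (temp.length : Int) = st.2.2.1 then
    if M ≥ st.2.2.2 then (temp, tempseq, (temp.length : Int), M) else st
  else st

def outerRec : List (Int × Int) → (List Int × List Int × Int × Int) → List Int × List Int × Int × Int
| [], st => st
| [_], st => st
| p :: q :: r, st => outerRec (q :: r) (aupd st (chain (p :: q :: r)))

-- stack abstraction for B
def stackOf : List (Int × Int) → List (Int × Int × Int × Int)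
| [] => []
| p :: c => (p.2, cD (p :: c)) :: stackOf c

theorem dropWhile_dropWhile {α : Type} (p q : α → Bool) (h : ∀ a, q a = true → p a = true)
    (l : List α) : (l.dropWhile q).dropWhile p = l.dropWhile p := by
  induction l with
  | nil => rfl
  | cons a l ih =>
    by_cases hq : q a = true
    · simp [List.dropWhile_cons, hq, h a hq, ih]
    · simp [List.dropWhile_cons, hq]

theorem cInfo_cons (p : Int × Int) (c : List (Int × Int)) :
    cInfo (p :: c) = some (((c.length : Int) + 1, (c.getLastD p).2, (c.getLastD p).1)) := by
  induction c generalizing p with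
  | nil => simp [cInfo]
  | cons q c ih =>
    rw [cInfo, ih q]
    simp only [List.getLastD_cons, List.length_cons, Option.some.injEq, Prod.mk.injEq]
    push_cast; ring_nf; simp

-- A's inner loop appends exactly the records beyond M, i.e. dropWhile (≤ M) of the chain
theorem records (z : List (Int × Int)) : ∀ (M : Int) (temp tempseq : List Int),
    z.foldl (fun (s : Int × List Int × List Int) q =>
        if s.1 < q.2 then (q.2, s.2.1 ++ [q.2], s.2.2 ++ [q.1]) else s) (M, temp, tempseq)
    = ((((chain z).dropWhile (fun q => q.2 ≤ M)).getLastD (0, M)).2,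
       temp ++ ((chain z).dropWhile (fun q => q.2 ≤ M)).map (·.2),
       tempseq ++ ((chain z).dropWhile (fun q => q.2 ≤ M)).map (·.1)) := by
  induction z with
  | nil => intro M temp tempseq; simp [chain]
  | cons p r ih =>
    intro M temp tempseq
    simp only [chain, List.foldl_cons]
    by_cases h : M < p.2
    · have hnot : ¬ (p.2 ≤ M) := by omega
      rw [List.dropWhile_cons_of_neg (by simpa using hnot)]
      rw [if_pos h, ih p.2 (temp ++ [p.2]) (tempseq ++ [p.1])]
      rcases hd : (chain r).dropWhile (fun q => q.2 ≤ p.2) with _ | ⟨q, d⟩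
      · simp [hd]
      · simp only [hd, List.getLastD_eq_getLast?]
        rcases hl : (q :: d).getLast? with _ | x
        · simp at hl
        · simp [hl]
    · have hle : p.2 ≤ M := by omega
      rw [List.dropWhile_cons_of_pos (by simpa using hle)]
      rw [dropWhile_dropWhile _ _ (by intro a ha; simp at ha ⊢; omega)]
      rw [if_neg h, ih M temp tempseq]

-- pyRange+pyGetD fold over a suffix = structural fold over (idx, value) pairs
theorem pyfold_idxs {β : Type} (data : List Int) (g : β → Int → Int → β) :
    ∀ (l : List Int) (s : Nat) (init : β), data.drop s = l →
    (PySem.List.pyRange (s : Int) ((data.length : Int)) 1).foldl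
        (fun acc y => g acc y (PySem.List.pyGetD data y 0)) init
    = (idxs s l).foldl (fun acc q => g acc q.1 q.2) init := by
  intro l
  induction l with
  | nil =>
    intro s init hd
    have hle : data.length ≤ s := by
      by_contra hlt
      have := List.drop_eq_nil_iff.mp hd
      omega
    rw [PySem.List.pyRange_one_eq_nil (by exact_mod_cast hle)]
    rfl
  | cons v l ih =>
    intro s init hd
    have hlt : s < data.length := by
      by_contra hge
      rw [List.drop_eq_nil_of_le (by omega)] at hd
      exact absurd hd (by simp)
    have hv : data[s]? = some v := by
      have h0 : (data.drop s)[0]? = some v := by rw [hd]; rfl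
      rwa [List.getElem?_drop, Nat.add_zero] at h0
    have hget : PySem.List.pyGetD data (s : Int) 0 = v := by
      rw [PySem.List.pyGetD_natCast, List.getD, hv]; rfl
    rw [PySem.List.pyRange_one_cons (by exact_mod_cast hlt), List.foldl_cons, hget]
    have hcast : (s : Int) + 1 = ((s + 1 : Nat) : Int) := by push_cast; ring
    rw [hcast, ih (s + 1) (g init (s : Int) v) (by rw [← List.tail_drop, hd]; rfl)]
    rfl

theorem inner_conv (data : List Int) (l : List Int) (s : Nat) (init : Int × List Int × List Int)
    (hd : data.drop s = l) :
    (PySem.List.pyRange (s : Int) ((data.length : Int)) 1).foldl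
      (fun (acc : Int × List Int × List Int) y =>
        if acc.1 < PySem.List.pyGetD data y 0 then
          (PySem.List.pyGetD data y 0, acc.2.1 ++ [PySem.List.pyGetD data y 0], acc.2.2 ++ [y])
        else acc) init
    = (idxs s l).foldl (fun acc q =>
        if acc.1 < q.2 then (q.2, acc.2.1 ++ [q.2], acc.2.2 ++ [q.1]) else acc) init :=
  pyfold_idxs data (fun acc y w => if acc.1 < w then (w, acc.2.1 ++ [w], acc.2.2 ++ [y]) else acc)
    l s init hd

theorem getLastD_snd (d : List (Int × Int)) (a b : Int × Int) (h : a.2 = b.2) :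
    (d.getLastD a).2 = (d.getLastD b).2 := by
  cases d with
  | nil => simpa
  | cons q d' => rw [List.getLastD_cons, List.getLastD_cons]

-- A's outer loop = outerRec on the indexed list
theorem outer_eq (data : List Int) : ∀ (l : List Int) (s : Nat)
    (st : List Int × List Int × Int × Int), data.drop s = l →
    (PySem.List.pyRange (s : Int) ((data.length : Int) - 1) 1).foldl
      (fun (st : List Int × List Int × Int × Int) x =>
        let inner := (PySem.List.pyRange (x + 1) (data.length : Int) 1).foldl
          (fun (s : Int × List Int × List Int) y =>
            if s.1 < PySem.List.pyGetD data y 0 then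
              (PySem.List.pyGetD data y 0, s.2.1 ++ [PySem.List.pyGetD data y 0], s.2.2 ++ [y])
            else s)
          (PySem.List.pyGetD data x 0, [PySem.List.pyGetD data x 0], [x])
        if (inner.2.1.length : Int) > st.2.2.1 then (inner.2.1, inner.2.2, (inner.2.1.length : Int), inner.1)
        else if (inner.2.1.length : Int) = st.2.2.1 then
          if inner.1 ≥ st.2.2.2 then (inner.2.1, inner.2.2, (inner.2.1.length : Int), inner.1) else st
        else st) st
    = outerRec (idxs s l) st := by
  intro l
  induction l with
  | nil =>
    intro s st hd
    have hle : data.length ≤ s := by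
      by_contra hlt
      have := List.drop_eq_nil_iff.mp hd
      omega
    rw [PySem.List.pyRange_one_eq_nil (by omega)]
    rfl
  | cons v r ihr =>
    cases r with
    | nil =>
      intro s st hd
      have hlen : data.length = s + 1 := by
        have h1 := congrArg List.length hd
        have h2 : s ≤ data.length := by
          by_contra hgt
          rw [List.drop_eq_nil_of_le (by omega)] at hd
          exact absurd hd (by simp)
        simp [List.length_drop] at h1
        omega
      rw [PySem.List.pyRange_one_eq_nil (by omega)]
      rfl
    | cons w r' =>
      intro s st hd
      have hlen : s + 2 ≤ data.length := by
        have h1 := congrArg List.length hd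
        have h2 : s ≤ data.length := by
          by_contra hgt
          rw [List.drop_eq_nil_of_le (by omega)] at hd
          exact absurd hd (by simp)
        simp [List.length_drop] at h1
        omega
      have hv : PySem.List.pyGetD data (s : Int) 0 = v := by
        have h0 : (data.drop s)[0]? = some v := by rw [hd]; rfl
        rw [List.getElem?_drop, Nat.add_zero] at h0
        rw [PySem.List.pyGetD_natCast, List.getD, h0]; rfl
      have hdrop1 : data.drop (s + 1) = w :: r' := by rw [← List.tail_drop, hd]; rfl
      have hcast : (s : Int) + 1 = ((s + 1 : Nat) : Int) := by push_cast; ring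
      rw [PySem.List.pyRange_one_cons (by omega), List.foldl_cons]
      simp only [hv, hcast]
      rw [inner_conv data (w :: r') (s + 1) _ hdrop1]
      rw [records (idxs (s + 1) (w :: r')) v [v] [(s : Int)]]
      rw [ihr (s + 1) _ hdrop1]
      have hidx : idxs s (v :: w :: r') = ((s : Int), v) :: (((s + 1 : Nat) : Int), w) :: idxs (s + 2) r' := rfl
      rw [hidx, outerRec]
      have hchain : chain (((s : Int), v) :: (((s + 1 : Nat) : Int), w) :: idxs (s + 2) r')
          = ((s : Int), v) :: (chain (idxs (s + 1) (w :: r'))).dropWhile (fun q => q.2 ≤ v) := rfl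
      rw [hchain]
      congr 1
      rw [aupd]
      simp only [List.map_cons, List.singleton_append, List.length_cons, List.getLastD_cons]
      rw [getLastD_snd _ ((0 : Int), v) ((s : Int), v) rfl]

theorem stackOf_dropWhile (v : Int) : ∀ (c : List (Int × Int)),
    (stackOf c).dropWhile (fun t => t.1 ≤ v) = stackOf (c.dropWhile (fun q => q.2 ≤ v)) := by
  intro c
  induction c with
  | nil => rfl
  | cons p c ih =>
    by_cases h : p.2 ≤ v
    · rw [stackOf, List.dropWhile_cons_of_pos (by simpa using h),
        List.dropWhile_cons_of_pos (by simpa using h), ih]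
    · rw [stackOf, List.dropWhile_cons_of_neg (by simpa using h),
        List.dropWhile_cons_of_neg (by simpa using h), stackOf]

-- B's backward fold invariant
theorem b_inv (data : List Int) : ∀ (l : List Int) (s : Nat), s + l.length = data.length →
    l.foldr (fun v st => altStep (data.length : Int) st v) (((data.length : Int)), [], none)
    = ((s : Int), stackOf (chain (idxs s l)), (trips (idxs s l)).reverse.foldl selB none) := by
  intro l
  induction l with
  | nil =>
    intro s hs
    simp only [List.length_nil, Nat.add_zero] at hs
    subst hs
    rfl
  | cons v r ih =>
    intro s hs
    rw [List.foldr_cons, ih (s + 1) (by have := hs; simp at this; omega)]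
    rw [altStep]
    simp only []
    have hi : ((s + 1 : Nat) : Int) - 1 = (s : Int) := by push_cast; ring
    rw [hi]
    rw [stackOf_dropWhile]
    have hchain : chain (idxs s (v :: r))
        = ((s : Int), v) :: (chain (idxs (s + 1) r)).dropWhile (fun q => q.2 ≤ v) := rfl
    set d := (chain (idxs (s + 1) r)).dropWhile (fun q => q.2 ≤ v) with hdd
    have hinfo : (match stackOf d with
        | [] => ((1 : Int), v, (s : Int))
        | t :: _ => (t.2.1 + 1, t.2.2.1, t.2.2.2)) = cD (((s : Int), v) :: d) := by
      cases hdc : d with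
      | nil => simp [stackOf, cD, cInfo]
      | cons q d' =>
        rw [stackOf]
        have : cInfo (q :: d') = some (cD (q :: d')) := by rw [cD, cInfo]; rfl
        simp only [cD, cInfo, this]
        rfl
    rw [hinfo]
    have hstk : ((v, cD (((s : Int), v) :: d)) :: stackOf d) = stackOf (chain (idxs s (v :: r))) := by
      rw [hchain, stackOf]
    rw [hstk, hchain]
    cases r with
    | nil =>
      have hn : data.length = s + 1 := by have := hs; simp at this; omega
      rw [if_neg (by omega)]
      rfl
    | cons w r' =>
      rw [if_pos (by have := hs; simp at this; omega)]
      have htr : trips (idxs s (v :: w :: r'))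
          = cD (chain (idxs s (v :: w :: r'))) :: trips (idxs (s + 1) (w :: r')) := rfl
      rw [htr, List.reverse_cons, List.foldl_append]
      simp only [List.foldl_cons, List.foldl_nil]
      rw [hchain]
      rcases hb : (trips (idxs (s + 1) (w :: r'))).reverse.foldl selB none with _ | b <;> rfl

-- A's state stays the selA fold of the triples (projection invariant)
def StInv (st : List Int × List Int × Int × Int) (acc : Option (Int × Int × Int)) : Prop :=
  (acc = none ∧ st = ([], [], 0, 0)) ∨
  ∃ t, acc = some t ∧ 1 ≤ t.1 ∧ st.2.2.1 = t.1 ∧ st.2.2.2 = t.2.1 ∧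
    st.1.getLast? = some t.2.1 ∧ st.2.1.getLast? = some t.2.2 ∧ st.1 ≠ []

theorem getLast?_cons' (a : Int × Int) (l : List (Int × Int)) :
    (a :: l).getLast? = some (l.getLastD a) := by
  cases h : l.getLast? <;> simp [h, List.getLast?_cons, List.getLastD_eq_getLast?]

theorem getLast?_map' (f : Int × Int → Int) (a : Int × Int) (l : List (Int × Int)) :
    ((a :: l).map f).getLast? = some (f (l.getLastD a)) := by
  rw [List.getLast?_map, getLast?_cons']
  rfl

theorem taken_inv (p : Int × Int) (c : List (Int × Int)) :
    StInv ((p :: c).map (·.2), (p :: c).map (·.1), (((p :: c).map (·.2)).length : Int),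
      ((p :: c).getLastD (0, 0)).2) (some (cD (p :: c))) := by
  have hcD : cD (p :: c) = (((c.length : Int) + 1, (c.getLastD p).2, (c.getLastD p).1)) := by
    rw [cD, cInfo_cons]; rfl
  refine Or.inr ⟨cD (p :: c), rfl, ?_, ?_, ?_, ?_, ?_, by simp⟩
  · rw [hcD]; omega
  · rw [hcD]; simp
  · rw [hcD, List.getLastD_cons]
  · rw [hcD]; exact getLast?_map' _ p c
  · rw [hcD]; exact getLast?_map' _ p c

theorem inv_step (st : List Int × List Int × Int × Int) (acc : Option (Int × Int × Int))
    (p : Int × Int) (c : List (Int × Int)) (h : StInv st acc) :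
    StInv (aupd st (p :: c)) (selA acc (cD (p :: c))) := by
  have hcD : cD (p :: c) = (((c.length : Int) + 1, (c.getLastD p).2, (c.getLastD p).1)) := by
    rw [cD, cInfo_cons]; rfl
  have hMeq : ((p :: c).getLastD (0, 0)).2 = (c.getLastD p).2 := by rw [List.getLastD_cons]
  rcases h with ⟨hacc, hst⟩ | ⟨t, hacc, ht1, hl, hb, hr, hsq, hne⟩
  · subst hacc; subst hst
    rw [aupd]
    simp only []
    rw [if_pos (by simp only [List.length_map, List.length_cons]; push_cast; omega)]
    exact taken_inv p c
  · subst hacc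
    rw [aupd, selA]
    have e1 : (cD (p :: c)).1 = (((p :: c).map (·.2)).length : Int) := by rw [hcD]; simp
    have e2 : (cD (p :: c)).2.1 = ((p :: c).getLastD (0, 0)).2 := by rw [hcD]; exact hMeq.symm
    split_ifs <;>
      first
        | exact taken_inv p c
        | exact Or.inr ⟨t, rfl, ht1, hl, hb, hr, hsq, hne⟩
        | (exfalso; omega)

theorem inv_outer : ∀ (z : List (Int × Int)) (st : List Int × List Int × Int × Int)
    (acc : Option (Int × Int × Int)), StInv st acc →
    StInv (outerRec z st) ((trips z).foldl selA acc) := by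
  intro z
  induction z using trips.induct with
  | case1 => intro st acc h; simpa [outerRec, trips]
  | case2 p => intro st acc h; simpa [outerRec, trips]
  | case3 p q r ih =>
    intro st acc h
    rw [outerRec, trips, List.foldl_cons]
    exact ih _ _ (inv_step st acc _ _ h)

-- reversal: B's strict right-to-left selection = A's tie-taking left-to-right selection
theorem selA_some (ts : List (Int × Int × Int)) : ∀ (t : Int × Int × Int),
    ∃ u, ts.foldl selA (some t) = some u := by
  induction ts with
  | nil => intro t; exact ⟨t, rfl⟩
  | cons u ts ih =>
    intro t
    simp only [List.foldl_cons, selA]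
    split <;> [skip; split] <;> exact ih _

theorem selB_none (t : Int × Int × Int) : selB none t = some t := rfl

theorem selB_yes (m t : Int × Int × Int) (h : t.1 > m.1 ∨ (t.1 = m.1 ∧ t.2.1 > m.2.1)) :
    selB (some m) t = some t := by simp [selB, h]

theorem selB_no (m t : Int × Int × Int) (h : ¬ (t.1 > m.1 ∨ (t.1 = m.1 ∧ t.2.1 > m.2.1))) :
    selB (some m) t = some m := by simp only [selB]; rw [if_neg h]

theorem selA_cases (t u : Int × Int × Int) :
    selA (some t) u = if u.1 > t.1 ∨ (u.1 = t.1 ∧ u.2.1 ≥ t.2.1) then some u else some t := by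
  simp only [selA]
  by_cases h1 : u.1 > t.1 <;> by_cases h2 : u.1 = t.1 ∧ u.2.1 ≥ t.2.1 <;>
    simp [h1, h2]

theorem sel_rev_helper (ts : List (Int × Int × Int)) : ∀ (t : Int × Int × Int),
    ts.foldl selA (some t) = selB (ts.foldl selA none) t := by
  induction ts with
  | nil => intro t; rfl
  | cons u ts ih =>
    intro t
    simp only [List.foldl_cons]
    have h0 : selA none u = some u := rfl
    rw [h0, ih u]
    by_cases hge : u.1 > t.1 ∨ (u.1 = t.1 ∧ u.2.1 ≥ t.2.1)
    · rw [selA_cases, if_pos hge]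
      rw [ih u]
      rcases hM : ts.foldl selA none with _ | m
      · rw [selB_none, selB_no]
        omega
      · by_cases hum : u.1 > m.1 ∨ (u.1 = m.1 ∧ u.2.1 > m.2.1)
        · rw [selB_yes _ _ hum, selB_no]
          omega
        · rw [selB_no _ _ hum, selB_no]
          omega
    · rw [selA_cases, if_neg hge]
      rw [ih t]
      rcases hM : ts.foldl selA none with _ | m
      · rw [selB_none, selB_none, selB_yes]
        omega
      · by_cases hum : u.1 > m.1 ∨ (u.1 = m.1 ∧ u.2.1 > m.2.1)
        · rw [selB_yes _ _ hum, selB_yes _ _ (by omega), selB_yes _ _ (by omega)]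
        · rw [selB_no _ _ hum]

theorem sel_rev (ts : List (Int × Int × Int)) :
    ts.reverse.foldl selB none = ts.foldl selA none := by
  induction ts with
  | nil => rfl
  | cons u ts ih =>
    rw [List.reverse_cons, List.foldl_append]
    simp only [List.foldl_cons, List.foldl_nil]
    rw [ih]
    have h0 : selA none u = some u := rfl
    rw [h0, sel_rev_helper]

-- ===== VERDICT (by name: the statement is the Claim_ definition above) =====
theorem getdp_add_spec : Claim_equal_getdp_add := by
  intro data _
  unfold Spec_getdp_add
  by_cases hn : data.length ≤ 1
  · have hA : getdp_add data = (none, none) := by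
      simp only [getdp_add]
      rw [PySem.List.pyRange_one_eq_nil (by omega)]
      rfl
    have hB : getdp_add_alt data = (none, none) := by
      simp only [getdp_add_alt]
      rw [if_pos (by omega)]
    rw [hA, hB]
  · match data, hn with
    | [], hn => exact absurd (by simp) hn
    | [a], hn => exact absurd (by simp) hn
    | a :: b :: rest, hn =>
      have houter := outer_eq (a :: b :: rest) (a :: b :: rest) 0 ([], [], 0, 0) rfl
      rw [Nat.cast_zero] at houter
      have hbinv := b_inv (a :: b :: rest) (a :: b :: rest) 0 (by simp)
      rw [Nat.cast_zero] at hbinv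
      have hinv := inv_outer (idxs 0 (a :: b :: rest)) ([], [], 0, 0) none (Or.inl ⟨rfl, rfl⟩)
      have htrip : trips (idxs 0 (a :: b :: rest))
          = cD (chain (idxs 0 (a :: b :: rest))) :: trips (idxs 1 (b :: rest)) := rfl
      obtain ⟨u, hu⟩ : ∃ u, (trips (idxs 0 (a :: b :: rest))).foldl selA none = some u := by
        rw [htrip, List.foldl_cons]
        exact selA_some _ _
      rw [hu] at hinv
      rcases hinv with ⟨hcon, _⟩ | ⟨t, hacc, ht1, hl, hb2, hr, hsq, hne⟩
      · exact absurd hcon (by simp)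
      · have htu : t = u := by injection hacc.symm
        subst htu
        have hA : getdp_add (a :: b :: rest)
            = (some t.2.1, some t.2.2) := by
          simp only [getdp_add]
          rw [houter]
          rw [if_neg (by simpa using hne)]
          rw [PySem.List.pyGet?_neg_one, PySem.List.pyGet?_neg_one, hr, hsq]
        have hB : getdp_add_alt (a :: b :: rest)
            = (some t.2.1, some t.2.2) := by
          simp only [getdp_add_alt]
          rw [if_neg (by simp)]
          rw [List.foldl_reverse, hbinv]
          simp only []
          rw [sel_rev, hu]
        rw [hA, hB]
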